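-- pv_equiv track=rewrite | github.com/Horse64/core.horse64.org | tools/translator_modules/translator_latertransform.py | stmt_has_later
-- ===== SOURCE A (Python) =====
-- def stmt_has_later(st):
--     assert(type(st) == list and (
--         len(st) == 0 or type(st[0]) == str))
--     bdepth = 0
--     i = 0
--     while i < len(st):
--         if st[i] == "later" and bdepth == 0:
--             return True
--         if st[i] in {"[", "(", "{"}:
--             bdepth += 1
--         elif st[i] in {"]", ")", "}"}:
--             bdepth -=1
--         i += 1
--     return False
-- ===== SOURCE B (Python) =====
-- def stmt_has_later(st):
--     assert(type(st) == list and (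
--         len(st) == 0 or type(st[0]) == str))
--     deltas = [1 if t in ("[", "(", "{") else
--               (-1 if t in ("]", ")", "}") else 0)
--               for t in st]
--     depth_before = [0]
--     for d in deltas:
--         depth_before.append(depth_before[-1] + d)
--     return any(tok == "later" and db == 0
--                for tok, db in zip(st, depth_before))
-- ===== Notes on version B (the rewrite author's own statement) =====
-- stated objective: alternative
-- what changed: Replaced the stateful interleaved scan (early return while tracking bracket depth) with a precomputed prefix-depth table plus a separate any() existence scan over zip(tokens, depths).
import Mathlib
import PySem

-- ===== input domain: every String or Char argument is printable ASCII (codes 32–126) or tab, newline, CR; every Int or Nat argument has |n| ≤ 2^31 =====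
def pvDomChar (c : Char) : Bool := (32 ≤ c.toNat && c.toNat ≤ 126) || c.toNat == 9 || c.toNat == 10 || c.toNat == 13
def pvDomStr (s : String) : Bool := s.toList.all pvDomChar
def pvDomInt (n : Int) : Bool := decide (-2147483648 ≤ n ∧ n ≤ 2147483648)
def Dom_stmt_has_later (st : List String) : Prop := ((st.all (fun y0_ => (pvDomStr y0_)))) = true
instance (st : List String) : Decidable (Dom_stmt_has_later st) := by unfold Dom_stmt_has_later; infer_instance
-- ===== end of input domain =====

-- B replaces A's stateful interleaved scan by a precomputed prefix-depth table plus a separate existence scan (alternative decomposition, same cost).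


-- ===== PORT A =====
-- literal port of A's while loop: early return on top-level "later", otherwise update bdepth
def stmt_has_later_go (st : List String) (bdepth : Int) : Bool :=
  match st with
  | [] => false
  | t :: rest =>
    if t = "later" ∧ bdepth = 0 then true
    else if t = "[" ∨ t = "(" ∨ t = "{" then stmt_has_later_go rest (bdepth + 1)
    else if t = "]" ∨ t = ")" ∨ t = "}" then stmt_has_later_go rest (bdepth - 1)
    else stmt_has_later_go rest bdepth

def stmt_has_later (st : List String) : Bool :=
  stmt_has_later_go st 0

-- ===== PORT B =====
def pvDelta (t : String) : Int :=
  if t = "[" ∨ t = "(" ∨ t = "{" then 1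
  else if t = "]" ∨ t = ")" ∨ t = "}" then -1
  else 0

def stmt_has_later_alt (st : List String) : Bool :=
  let deltas := st.map pvDelta
  let depth_before := List.scanl (· + ·) 0 deltas
  (st.zip depth_before).any (fun p => p.1 = "later" ∧ p.2 = 0)

-- ===== PRECONDITION & SPEC =====
def Spec_stmt_has_later (st : List String) (out : Bool) : Prop := out = stmt_has_later_alt st
instance (st : List String) (out : Bool) : Decidable (Spec_stmt_has_later st out) := by unfold Spec_stmt_has_later; infer_instance

-- ===== CLAIM (what is proved, stated in full; the proofs are below) =====
def Claim_equal_stmt_has_later : Prop := ∀ (st : List String), Dom_stmt_has_later st → Spec_stmt_has_later st (stmt_has_later st)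

-- ===== LEMMAS AND PROOFS =====
theorem stmt_has_later_go_eq (st : List String) (d : Int) :
    stmt_has_later_go st d =
      (st.zip (List.scanl (· + ·) d (st.map pvDelta))).any (fun p => p.1 = "later" ∧ p.2 = 0) := by
  induction st generalizing d with
  | nil => simp [stmt_has_later_go]
  | cons t rest ih =>
    simp only [stmt_has_later_go, List.map_cons, List.scanl_cons, List.zip_cons_cons,
      List.any_cons, pvDelta]
    by_cases h : t = "later" ∧ d = 0
    · simp [h]
    · by_cases h1 : t = "[" ∨ t = "(" ∨ t = "{"
      · simp [ih, h, h1]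
      · by_cases h2 : t = "]" ∨ t = ")" ∨ t = "}"
        · have : d - 1 = d + -1 := by omega
          simp [ih, h, h1, h2, this]
        · simp [ih, h, h1, h2]

-- ===== VERDICT (by name: the statement is the Claim_ definition above) =====
theorem stmt_has_later_spec : Claim_equal_stmt_has_later := by
  intro st _
  unfold Spec_stmt_has_later stmt_has_later stmt_has_later_alt
  exact stmt_has_later_go_eq st 0
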